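-- pv_equiv track=rewrite | github.com/jedrz/advent-of-code | 2023/14/solution.py | calculate_single_load
-- ===== SOURCE A (Python) =====
-- def calculate_single_load(column):
--     load = 0
--     current_load = len(column)
--     last_round_rock_pos = len(column)
--     for i, c in enumerate(column):
--         row = len(column) - i
--         if c == 'O':
--             load += last_round_rock_pos
--             last_round_rock_pos -= 1
--         elif c == '#':
--             last_round_rock_pos = row - 1
--         current_load -= 1
--     return load
-- ===== SOURCE B (Python) =====
-- def calculate_single_load(column):
--     # Two stages: (1) split the column into '#'-bounded segments, recording for
--     # each its start index and its count of 'O' rocks; (2) sum an arithmetic-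
--     # series closed form per segment.
--     L = len(column)
--     segments = []  # (start index of segment, number of 'O' in it)
--     start = 0
--     count = 0
--     for i, c in enumerate(column):
--         if c == '#':
--             segments.append((start, count))
--             start = i + 1
--             count = 0
--         elif c == 'O':
--             count += 1
--     segments.append((start, count))
--     return sum(k * (L - s) - k * (k - 1) // 2 for s, k in segments)
-- ===== Notes on version B (the rewrite author's own statement) =====
-- stated objective: alternative
-- what changed: Replaces A's single fold that adds a decrementing per-rock position for every 'O' with a two-stage algorithm: first split the column into '#'-bounded segments as a list of (start, O-count) pairs, then sum the arithmetic-series closed form k*(L-s) - k*(k-1)//2 over that list.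
import Mathlib
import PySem

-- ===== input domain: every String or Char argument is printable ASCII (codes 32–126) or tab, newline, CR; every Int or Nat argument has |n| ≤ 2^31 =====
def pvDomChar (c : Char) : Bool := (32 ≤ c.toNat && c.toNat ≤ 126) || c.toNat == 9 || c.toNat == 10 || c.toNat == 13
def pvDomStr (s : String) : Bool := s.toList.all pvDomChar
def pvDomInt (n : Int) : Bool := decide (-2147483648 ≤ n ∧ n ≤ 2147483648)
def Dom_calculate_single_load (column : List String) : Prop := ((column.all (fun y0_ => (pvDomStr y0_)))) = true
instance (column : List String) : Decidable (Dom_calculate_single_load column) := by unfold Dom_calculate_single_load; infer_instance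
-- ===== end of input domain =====

-- B replaces A's per-rock fold by a two-stage algorithm: build the list of '#'-bounded
-- segments (start index, O-count), then sum a closed form per segment (alternative, same cost).

-- ===== PORT A =====
-- state = (load, current_load, last_round_rock_pos)
def calculate_single_load (column : List String) : Int :=
  let st :=
    (PySem.List.enumerate column 0).foldl
      (fun (s : Int × Int × Int) ic =>
        if ic.2 = "O" then (s.1 + s.2.2, s.2.1 - 1, s.2.2 - 1)
        else if ic.2 = "#" then (s.1, s.2.1 - 1, ((column.length : Int) - ic.1) - 1)
        else (s.1, s.2.1 - 1, s.2.2))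
      (0, (column.length : Int), (column.length : Int))
  st.1

-- ===== PORT B =====
-- stage 1: split into segments, each recorded as (start index, count of 'O')
def pvSegs : List String → Int → Int → Int → List (Int × Int)
  | [], start, count, _ => [(start, count)]
  | c :: rest, start, count, i =>
    if c = "#" then (start, count) :: pvSegs rest (i + 1) 0 (i + 1)
    else if c = "O" then pvSegs rest start (count + 1) (i + 1)
    else pvSegs rest start count (i + 1)

-- stage 2: arithmetic-series closed form for one segment
def pvSegLoad (L : Int) (sk : Int × Int) : Int :=
  sk.2 * (L - sk.1) - PySem.Int.floordiv (sk.2 * (sk.2 - 1)) 2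

def calculate_single_load_alt (column : List String) : Int :=
  ((pvSegs column 0 0 0).map (pvSegLoad (column.length : Int))).foldl (· + ·) 0

-- ===== PRECONDITION & SPEC =====
def Spec_calculate_single_load (column : List String) (out : Int) : Prop := out = calculate_single_load_alt column
instance (column : List String) (out : Int) : Decidable (Spec_calculate_single_load column out) := by unfold Spec_calculate_single_load; infer_instance

-- ===== CLAIM (what is proved, stated in full; the proofs are below) =====
def Claim_equal_calculate_single_load : Prop := ∀ (column : List String), Dom_calculate_single_load column → Spec_calculate_single_load column (calculate_single_load column)

-- ===== LEMMAS AND PROOFS =====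

theorem pv_fd_zero : PySem.Int.floordiv 0 2 = 0 := by norm_num [PySem.Int.floordiv]

-- triangular increment: (c+1)*c // 2 = c*(c-1) // 2 + c
theorem pv_tri_succ (c : Int) :
    PySem.Int.floordiv ((c + 1) * c) 2 = PySem.Int.floordiv (c * (c - 1)) 2 + c := by
  rw [PySem.Int.floordiv_eq_ediv_of_pos (by omega), PySem.Int.floordiv_eq_ediv_of_pos (by omega)]
  have h : (c + 1) * c = c * (c - 1) + c * 2 := by ring
  rw [h, Int.add_mul_ediv_right _ _ (by omega)]

theorem pv_foldl_add_shift (l : List Int) : ∀ a : Int, l.foldl (· + ·) a = a + l.foldl (· + ·) 0 := by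
  induction l with
  | nil => intro a; simp
  | cons x xs ih =>
    intro a
    simp only [List.foldl_cons]
    rw [ih (a + x), ih (0 + x)]
    ring

-- loop invariant: A's fold from index s, inside a segment that started at `start`
-- with `count` rocks already rolled, equals the accumulated closed form plus the
-- summed closed forms of the remaining segments produced by pvSegs.
theorem pv_key (N : Int) (xs : List String) :
    ∀ (s start count lb cur : Int),
    ((PySem.List.enumerate xs s).foldl
      (fun (st : Int × Int × Int) ic =>
        if ic.2 = "O" then (st.1 + st.2.2, st.2.1 - 1, st.2.2 - 1)
        else if ic.2 = "#" then (st.1, st.2.1 - 1, (N - ic.1) - 1)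
        else (st.1, st.2.1 - 1, st.2.2))
      (lb + count * (N - start) - PySem.Int.floordiv (count * (count - 1)) 2,
       cur, N - start - count)).1
    = lb + ((pvSegs xs start count s).map (pvSegLoad N)).foldl (· + ·) 0 := by
  induction xs with
  | nil =>
    intro s start count lb cur
    simp only [PySem.List.enumerate, List.foldl_nil, pvSegs, List.map, List.foldl_cons,
      List.foldl_nil, pvSegLoad, zero_add]
    ring
  | cons x xs ih =>
    intro s start count lb cur
    rw [PySem.List.enumerate_cons]
    by_cases hO : x = "O"
    · simp only [List.foldl_cons, hO, String.reduceEq, reduceIte, pvSegs]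
      have h1 : lb + count * (N - start) - PySem.Int.floordiv (count * (count - 1)) 2
            + (N - start - count)
          = lb + (count + 1) * (N - start)
            - PySem.Int.floordiv ((count + 1) * (count + 1 - 1)) 2 := by
        rw [add_sub_cancel_right]
        linear_combination pv_tri_succ count
      have h2 : N - start - count - 1 = N - start - (count + 1) := by ring
      rw [h1, h2]
      exact ih (s + 1) start (count + 1) lb (cur - 1)
    · by_cases hH : x = "#"
      · simp only [List.foldl_cons, hH, String.reduceEq, reduceIte, pvSegs]
        have e := ih (s + 1) (s + 1) 0
          (lb + (count * (N - start) - PySem.Int.floordiv (count * (count - 1)) 2)) (cur - 1)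
        simp only [zero_mul, pv_fd_zero, sub_zero, add_zero, zero_sub] at e
        have h1 : lb + count * (N - start) - PySem.Int.floordiv (count * (count - 1)) 2
            = lb + (count * (N - start) - PySem.Int.floordiv (count * (count - 1)) 2) + 0 := by ring
        have h2 : N - s - 1 = N - (s + 1) - 0 := by ring
        rw [h1, h2]
        simp only [add_zero, sub_zero]
        rw [e, List.map_cons, List.foldl_cons]
        rw [pv_foldl_add_shift _ (0 + pvSegLoad N (start, count))]
        simp only [pvSegLoad, zero_add]
        ring
      · simp only [List.foldl_cons, if_neg hO, if_neg hH, pvSegs]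
        exact ih (s + 1) start count lb (cur - 1)

-- ===== VERDICT (by name: the statement is the Claim_ definition above) =====
theorem calculate_single_load_spec : Claim_equal_calculate_single_load := by
  intro column _
  unfold Spec_calculate_single_load calculate_single_load calculate_single_load_alt
  have h := pv_key (column.length : Int) column 0 0 0 0 (column.length : Int)
  simp only [zero_mul, pv_fd_zero, sub_zero, add_zero, zero_add, zero_sub] at h
  exact h
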